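-- pv_equiv track=rewrite | github.com/shakfu/graph-layout | src/graph_layout/planarity/__init__.py | _preprocess_edges
-- ===== SOURCE A (Python) =====
-- from collections import Counter
-- from typing import Sequence
--
-- def _preprocess_edges(
--     num_nodes: int,
--     edges: Sequence[tuple[int, int]],
-- ) -> list[tuple[int, int]] | None:
--     """Remove self-loops and check parallel edge multiplicity.
--
--     Returns:
--         Cleaned edge list, or None if 3+ parallel edges detected.
--     """
--     # Count edge multiplicities using canonical (min, max) form
--     edge_count: Counter[tuple[int, int]] = Counter()
--     clean: list[tuple[int, int]] = []
--
--     for u, v in edges: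
--         if u == v:
--             # Self-loop: skip
--             continue
--         canon = (min(u, v), max(u, v))
--         edge_count[canon] += 1
--         if edge_count[canon] > 2:
--             # 3+ parallel edges: non-planar
--             return None
--         clean.append((u, v))
--
--     return clean
-- ===== SOURCE B (Python) =====
-- def _preprocess_edges(num_nodes, edges):
--     """Sort-and-scan version: no counting structure at all.  Canonicalize the
--     non-self-loop edges, sort them, and detect a 3+ multiplicity as two equal
--     entries at distance 2 in the sorted list; then filter in a second pass."""
--     canon = sorted((u, v) if u < v else (v, u) for u, v in edges if u != v)
--     if any(a == b for a, b in zip(canon, canon[2:])):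
--         return None
--     return [(u, v) for u, v in edges if u != v]
-- ===== Notes on version B (the rewrite author's own statement) =====
-- stated objective: alternative
-- what changed: A maintains a Counter inside one interleaved loop (count + threshold guard with early exit at the third duplicate + append); B uses no counting structure at all: it sorts the canonicalized non-self-loop edges and detects multiplicity >= 3 as two equal entries at distance 2 in the sorted list, then filters the edges in a separate pass; trades A's O(n) hash counting for an O(n log n) sort.
import Mathlib
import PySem

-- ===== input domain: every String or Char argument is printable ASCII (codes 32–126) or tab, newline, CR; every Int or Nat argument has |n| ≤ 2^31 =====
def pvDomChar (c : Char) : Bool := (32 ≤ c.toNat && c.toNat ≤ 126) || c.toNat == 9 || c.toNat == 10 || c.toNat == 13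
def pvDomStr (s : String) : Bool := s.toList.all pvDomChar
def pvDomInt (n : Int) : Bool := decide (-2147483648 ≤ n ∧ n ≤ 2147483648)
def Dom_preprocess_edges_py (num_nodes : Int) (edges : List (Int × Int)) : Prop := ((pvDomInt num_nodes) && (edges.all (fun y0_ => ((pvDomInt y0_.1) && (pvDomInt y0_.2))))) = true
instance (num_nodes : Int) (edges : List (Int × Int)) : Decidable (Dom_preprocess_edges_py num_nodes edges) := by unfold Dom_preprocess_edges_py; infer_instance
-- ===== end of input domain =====

-- B drops A's Counter entirely: it sorts the canonicalized non-self-loop edges and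
-- detects a 3+ multiplicity as two equal entries at distance 2 in the sorted list,
-- then filters in a separate pass; objective: alternative algorithm (sort-and-scan).

-- ===== PORT A =====
-- the for-loop of A: state = (edge_count, clean); early 'return None' = result none
def pvGoA : List (Int × Int) → PySem.Dict (Int × Int) Int → List (Int × Int) → Option (List (Int × Int))
  | [], _, clean => some clean
  | (u, v) :: rest, edge_count, clean =>
    if u = v then pvGoA rest edge_count clean
    else
      let canon := (min u v, max u v)
      let n := edge_count.getD canon 0 + 1   -- edge_count[canon] += 1
      let edge_count' := edge_count.insert canon n
      if 2 < n then none
      else pvGoA rest edge_count' (clean ++ [(u, v)])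

def preprocess_edges_py (num_nodes : Int) (edges : List (Int × Int)) : Option (List (Int × Int)) :=
  pvGoA edges PySem.Dict.empty []

-- ===== PORT B =====
-- canon = sorted((u, v) if u < v else (v, u) for u, v in edges if u != v)
-- if any(a == b for a, b in zip(canon, canon[2:])): return None
-- return [(u, v) for u, v in edges if u != v]
def preprocess_edges_py_alt (num_nodes : Int) (edges : List (Int × Int)) : Option (List (Int × Int)) :=
  let canon := PySem.List.sorted2
    ((edges.filter (fun e => !(e.1 == e.2))).map (fun e => if e.1 < e.2 then e else (e.2, e.1)))
    Prod.fst Prod.snd   -- Python's tuple sort = lexicographic on the two components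
  if (canon.zip (PySem.List.slice canon (some 2) none)).any (fun p => p.1 == p.2) then none
  else some (edges.filter (fun e => !(e.1 == e.2)))

-- ===== PRECONDITION & SPEC =====
def Spec_preprocess_edges_py (num_nodes : Int) (edges : List (Int × Int)) (out : Option (List (Int × Int))) : Prop := out = preprocess_edges_py_alt num_nodes edges
instance (num_nodes : Int) (edges : List (Int × Int)) (out : Option (List (Int × Int))) : Decidable (Spec_preprocess_edges_py num_nodes edges out) := by unfold Spec_preprocess_edges_py; infer_instance

-- ===== CLAIM (what is proved, stated in full; the proofs are below) =====
def Claim_equal_preprocess_edges_py : Prop := ∀ (num_nodes : Int) (edges : List (Int × Int)), Dom_preprocess_edges_py num_nodes edges → Spec_preprocess_edges_py num_nodes edges (preprocess_edges_py num_nodes edges)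

-- ===== LEMMAS AND PROOFS =====

-- canonical edges of the non-self-loop part of a list
def pvCanon (l : List (Int × Int)) : List (Int × Int) :=
  (l.filter (fun e => !(e.1 == e.2))).map (fun e => (min e.1 e.2, max e.1 e.2))

lemma pvAny_congr_mem {α : Type} (l : List α) (p q : α → Bool)
    (h : ∀ x ∈ l, p x = q x) : l.any p = l.any q := by
  induction l with
  | nil => rfl
  | cons a t ih =>
    simp only [List.any_cons, h a (by simp), ih (fun x hx => h x (by simp [hx]))]

-- A's loop, characterised: None iff some canonical edge's final total exceeds 2
lemma pvGoA_eq (rest : List (Int × Int)) (cnt : PySem.Dict (Int × Int) Int)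
    (clean : List (Int × Int)) :
    pvGoA rest cnt clean =
      if (pvCanon rest).any (fun c => decide (2 < cnt.getD c 0 + ((pvCanon rest).count c : Int)))
      then none
      else some (clean ++ rest.filter (fun e => !(e.1 == e.2))) := by
  induction rest generalizing cnt clean with
  | nil => simp [pvGoA, pvCanon]
  | cons e rest ih =>
    obtain ⟨u, v⟩ := e
    by_cases huv : u = v
    · simp only [pvGoA, if_pos huv]
      rw [ih]
      have h1 : pvCanon ((u, v) :: rest) = pvCanon rest := by
        simp [pvCanon, huv]
      have h2 : ((u, v) :: rest).filter (fun e => !(e.1 == e.2))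
          = rest.filter (fun e => !(e.1 == e.2)) := by
        simp [huv]
      simp only [h1, h2]
    · have hcanon : pvCanon ((u, v) :: rest)
          = (min u v, max u v) :: pvCanon rest := by
        simp [pvCanon, huv]
      have hfil : ((u, v) :: rest).filter (fun e => !(e.1 == e.2))
          = (u, v) :: rest.filter (fun e => !(e.1 == e.2)) := by
        simp [huv]
      set c := (min u v, max u v) with hc
      set T := pvCanon rest with hT
      simp only [pvGoA, if_neg huv, hcanon, hfil]
      by_cases hbig : 2 < cnt.getD c 0 + 1
      · have hcond : ((c :: T).any fun d => decide (2 < cnt.getD d 0 + ((c :: T).count d : Int))) = true := by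
          simp only [List.any_cons, Bool.or_eq_true, decide_eq_true_eq]
          left
          have h0 : (0 : Int) ≤ (T.count c : Int) := Int.natCast_nonneg _
          simp only [List.count_cons_self]
          push_cast
          omega
        rw [if_pos hbig, hcond]
        simp
      · rw [if_neg hbig, ih]
        -- compare the two any-conditions
        have hq : ∀ x ∈ T,
            (decide (2 < (cnt.insert c (cnt.getD c 0 + 1)).getD x 0 + (T.count x : Int)))
            = (decide (2 < cnt.getD x 0 + (((c :: T).count x : Nat) : Int))) := by
          intro x hx
          rw [PySem.Dict.getD_insert]
          by_cases hxc : x = c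
          · subst hxc
            simp only [List.count_cons_self]
            exact decide_eq_decide.mpr (by push_cast; omega)
          · have hb1 : (x == c) = false := by simp [hxc]
            have hb2 : (c == x) = false := by simp only [beq_eq_false_iff_ne, ne_eq]; exact fun h => hxc h.symm
            have hcnt : (c :: T).count x = T.count x := by
              simp [List.count_cons, hb2]
            rw [if_neg hxc, hcnt]
        have hPQ : (T.any fun x => decide (2 < (cnt.insert c (cnt.getD c 0 + 1)).getD x 0 + (T.count x : Int)))
            = (T.any fun x => decide (2 < cnt.getD x 0 + ((c :: T).count x : Int))) :=
          pvAny_congr_mem _ _ _ hq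
        have hcond : ((c :: T).any fun d => decide (2 < cnt.getD d 0 + ((c :: T).count d : Int)))
            = (T.any fun x => decide (2 < (cnt.insert c (cnt.getD c 0 + 1)).getD x 0 + (T.count x : Int))) := by
          rw [hPQ, List.any_cons]
          by_cases hmem : c ∈ T
          · by_cases hQc : (2 < cnt.getD c 0 + ((c :: T).count c : Int))
            · have htail : (T.any fun x => decide (2 < cnt.getD x 0 + ((c :: T).count x : Int))) = true :=
                List.any_eq_true.mpr ⟨c, hmem, by simpa using hQc⟩
              simp [htail]
            · rw [decide_eq_false hQc]
              simp
          · have hcount0 : T.count c = 0 := List.count_eq_zero.mpr hmem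
            have hPc : (decide (2 < cnt.getD c 0 + ((c :: T).count c : Int))) = false := by
              simp only [List.count_cons_self, hcount0, decide_eq_false_iff_not]
              push_cast
              omega
            rw [hPc]
            simp
        simp only [hcond]
        rcases hA : (T.any fun x => decide (2 < (cnt.insert c (cnt.getD c 0 + 1)).getD x 0 + (T.count x : Int))) with _ | _
        · simp
        · simp

-- the strict lexicographic comparison sorted2 uses with keys fst, snd
def pvLt (a b : Int × Int) : Bool :=
  decide (a.1 < b.1) || (!decide (b.1 < a.1) && decide (a.2 < b.2))

lemma pvLt_iff (a b : Int × Int) : pvLt a b = true ↔ a.1 < b.1 ∨ (a.1 = b.1 ∧ a.2 < b.2) := by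
  simp only [pvLt, Bool.or_eq_true, Bool.and_eq_true, Bool.not_eq_true', decide_eq_true_eq,
    decide_eq_false_iff_not]
  omega

lemma pvLt_asymm {x y : Int × Int} (h : pvLt x y = true) : pvLt y x = false := by
  rcases hh : pvLt y x with _ | _
  · rfl
  · have h1 := (pvLt_iff x y).mp h
    have h2 := (pvLt_iff y x).mp hh
    omega

lemma pvLt_antisymm {a b : Int × Int} (h1 : pvLt a b = false) (h2 : pvLt b a = false) : a = b := by
  have n1 : ¬ (a.1 < b.1 ∨ (a.1 = b.1 ∧ a.2 < b.2)) := (pvLt_iff a b).not.mp (by simp [h1])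
  have n2 : ¬ (b.1 < a.1 ∨ (b.1 = a.1 ∧ b.2 < a.2)) := (pvLt_iff b a).not.mp (by simp [h2])
  obtain ⟨a1, a2⟩ := a; obtain ⟨b1, b2⟩ := b
  simp only [Prod.mk.injEq]
  constructor <;> omega

lemma pvLt_false_of_lt_of_false {x y z : Int × Int}
    (hxy : pvLt x y = true) (hzy : pvLt z y = false) : pvLt z x = false := by
  have h1 := (pvLt_iff x y).mp hxy
  have h2 : ¬ (z.1 < y.1 ∨ (z.1 = y.1 ∧ z.2 < y.2)) := (pvLt_iff z y).not.mp (by simp [hzy])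
  have : ¬ (z.1 < x.1 ∨ (z.1 = x.1 ∧ z.2 < x.2)) := by omega
  rcases h : pvLt z x with _ | _
  · rfl
  · exact absurd ((pvLt_iff z x).mp h) this

-- insertion keeps the list pairwise-sorted for the relation 'not greater'
lemma pvInsertBy_pairwise (x : Int × Int) (acc : List (Int × Int))
    (h : acc.Pairwise (fun a b => pvLt b a = false)) :
    (PySem.List.insertBy pvLt x acc).Pairwise (fun a b => pvLt b a = false) := by
  induction acc with
  | nil => simp [PySem.List.insertBy]
  | cons y ys ih =>
    rw [List.pairwise_cons] at h
    obtain ⟨hy, hys⟩ := h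
    by_cases hxy : pvLt x y = true
    · simp only [PySem.List.insertBy, if_pos hxy]
      rw [List.pairwise_cons]
      refine ⟨?_, by rw [List.pairwise_cons]; exact ⟨hy, hys⟩⟩
      intro z hz
      rcases List.mem_cons.mp hz with heq | hz
      · subst heq
        exact pvLt_asymm hxy
      · exact pvLt_false_of_lt_of_false hxy (hy z hz)
    · have hxy' : pvLt x y = false := by rcases h : pvLt x y with _ | _; rfl; exact absurd h hxy
      simp only [PySem.List.insertBy, if_neg hxy]
      rw [List.pairwise_cons]
      refine ⟨?_, ih hys⟩
      intro z hz
      rcases (PySem.List.mem_insertBy pvLt x z ys).mp hz with rfl | hz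
      · exact hxy'
      · exact hy z hz

-- sorted2 with keys fst, snd is foldl-insertion with pvLt (definitional), hence pairwise
lemma pvSorted2_pairwise (xs : List (Int × Int)) :
    (PySem.List.sorted2 xs Prod.fst Prod.snd).Pairwise (fun a b => pvLt b a = false) := by
  have hgen : ∀ (l : List (Int × Int)) (acc : List (Int × Int)),
      acc.Pairwise (fun a b => pvLt b a = false) →
      (l.foldl (fun acc x => PySem.List.insertBy pvLt x acc) acc).Pairwise
        (fun a b => pvLt b a = false) := by
    intro l
    induction l with
    | nil => intro acc h; simpa using h
    | cons x t ih =>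
      intro acc h
      exact ih _ (pvInsertBy_pairwise x acc h)
  exact hgen xs [] (by simp)

-- in a lex-sorted list, some element has multiplicity ≥ 3 iff two entries at
-- distance 2 are equal (the zip-with-drop-2 scan of B)
lemma pvTriple_iff (l : List (Int × Int))
    (h : l.Pairwise (fun a b => pvLt b a = false)) :
    ((l.zip (l.drop 2)).any (fun p => p.1 == p.2) = true) ↔ ∃ x, 2 < l.count x := by
  induction l with
  | nil => simp
  | cons a t ih =>
    rw [List.pairwise_cons] at h
    obtain ⟨ha, ht⟩ := h
    match t, ha, ht, ih with
    | [], _, _, _ =>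
      simp only [List.drop, List.zip_nil_right, List.any_nil, Bool.false_eq_true, false_iff,
        not_exists, not_lt]
      intro x
      calc List.count x [a] ≤ [a].length := List.count_le_length
        _ ≤ 2 := by simp
    | [b], _, _, _ =>
      simp only [List.drop, List.zip_nil_right, List.any_nil, Bool.false_eq_true, false_iff,
        not_exists, not_lt]
      intro x
      calc List.count x [a, b] ≤ [a, b].length := List.count_le_length
        _ ≤ 2 := by simp
    | b :: c :: r, ha, ht, ih =>
      have hzip : ((a :: b :: c :: r).zip ((a :: b :: c :: r).drop 2))
          = (a, c) :: ((b :: c :: r).zip ((b :: c :: r).drop 2)) := rfl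
      rw [hzip, List.any_cons]
      have hRab : pvLt b a = false := ha b (by simp)
      have hRac : pvLt c a = false := ha c (by simp)
      rw [List.pairwise_cons] at ht
      obtain ⟨hb, htcr⟩ := ht
      have hRbc : pvLt c b = false := hb c (by simp)
      rw [List.pairwise_cons] at htcr
      obtain ⟨hc, hr⟩ := htcr
      constructor
      · intro hor
        rcases Bool.or_eq_true .. |>.mp hor with hac | htail
        · -- a == c : then b = a too, so count a ≥ 3
          have hac' : a = c := by simpa using hac
          have hba : b = a := by
            apply pvLt_antisymm hRab
            rw [hac'] at *
            exact hRbc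
          refine ⟨a, ?_⟩
          rw [hba, ← hac']
          have h3 : (a :: a :: a :: r).count a = r.count a + 3 := by
            simp [List.count_cons_self]
          omega
        · obtain ⟨x, hx⟩ := (ih (by rw [List.pairwise_cons]; exact ⟨hb, by rw [List.pairwise_cons]; exact ⟨hc, hr⟩⟩)).mp htail
          exact ⟨x, lt_of_lt_of_le hx ((List.sublist_cons_self a (b :: c :: r)).count_le x)⟩
      · rintro ⟨x, hx⟩
        by_cases hax : a = x
        · -- x occurs ≥ 2 more times in b :: c :: r, sortedness forces b = c = x
          subst hax
          have hcnt_t : 2 ≤ (b :: c :: r).count a := by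
            have h0 : (a :: b :: c :: r).count a = (b :: c :: r).count a + 1 := by
              simp [List.count_cons_self]
            omega
          have hba : b = a := by
            by_cases hba' : b = a
            · exact hba'
            · exfalso
              have hcnt_cr : 1 ≤ (c :: r).count a := by
                have h0 : (b :: c :: r).count a = (c :: r).count a := by
                  simp [List.count_cons, hba']
                omega
              have hmem : a ∈ c :: r := List.count_pos_iff.mp (by omega)
              have h1 : pvLt a b = false := hb a hmem
              exact hba' (pvLt_antisymm hRab h1)
          have hca : c = a := by
            by_cases hca' : c = a
            · exact hca'
            · exfalso
              have hcnt_r : 1 ≤ r.count a := by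
                have h0 : (b :: c :: r).count a = r.count a + 1 := by
                  simp [hba, hca']
                omega
              have hmem : a ∈ r := List.count_pos_iff.mp (by omega)
              have h1 : pvLt a c = false := hc a hmem
              exact hca' (pvLt_antisymm hRac h1)
          apply Bool.or_eq_true .. |>.mpr
          left
          simp [hca]
        · -- x lives in the tail with the same multiplicity
          have hxa : (a == x) = false := beq_eq_false_iff_ne.mpr hax
          have hx_t : 2 < (b :: c :: r).count x := by
            have h0 : (a :: b :: c :: r).count x = (b :: c :: r).count x := by
              rw [List.count_cons, hxa]
              simp
            omega
          apply Bool.or_eq_true .. |>.mpr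
          right
          exact (ih (by rw [List.pairwise_cons]; exact ⟨hb, by rw [List.pairwise_cons]; exact ⟨hc, hr⟩⟩)).mpr ⟨x, hx_t⟩

-- B's canonicalisation equals A's (min,max) form, edge by edge
lemma pvCanon_map_eq (l : List (Int × Int)) :
    (l.filter (fun e => !(e.1 == e.2))).map (fun e => if e.1 < e.2 then e else (e.2, e.1))
      = pvCanon l := by
  unfold pvCanon
  apply List.map_congr_left
  intro e _
  obtain ⟨u, v⟩ := e
  by_cases h : u < v
  · simp only [if_pos h]
    rw [Prod.mk.injEq]
    constructor <;> [exact (min_eq_left (le_of_lt h)).symm; exact (max_eq_right (le_of_lt h)).symm]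
  · simp only [if_neg h]
    rw [Prod.mk.injEq]
    rw [not_lt] at h
    constructor <;> [exact (min_eq_right h).symm; exact (max_eq_left h).symm]

-- ===== VERDICT (by name: the statement is the Claim_ definition above) =====
theorem preprocess_edges_py_spec : Claim_equal_preprocess_edges_py := by
  intro num_nodes edges _
  show preprocess_edges_py num_nodes edges = preprocess_edges_py_alt num_nodes edges
  unfold preprocess_edges_py preprocess_edges_py_alt
  simp only []
  rw [pvGoA_eq, pvCanon_map_eq]
  set S := PySem.List.sorted2 (pvCanon edges) Prod.fst Prod.snd with hS
  have hslice : PySem.List.slice S (some 2) none = S.drop 2 := by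
    rw [show ((2 : Int)) = ((2 : Nat) : Int) from rfl, PySem.List.slice_from_natCast]
  rw [hslice]
  have hperm : S.Perm (pvCanon edges) := PySem.List.sorted2_perm _ _ _ _
  have hcount : ∀ x, (pvCanon edges).count x = S.count x := fun x => (hperm.count_eq x).symm
  have hcondA : ((pvCanon edges).any
        (fun c => decide (2 < (PySem.Dict.empty : PySem.Dict (Int × Int) Int).getD c 0 + ((pvCanon edges).count c : Int))))
      = ((S.zip (S.drop 2)).any (fun p => p.1 == p.2)) := by
    rw [Bool.eq_iff_iff]
    rw [pvTriple_iff S (pvSorted2_pairwise _)]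
    simp only [List.any_eq_true, decide_eq_true_eq, PySem.Dict.getD_empty]
    constructor
    · rintro ⟨c, _, hgt⟩
      exact ⟨c, by rw [← hcount]; exact_mod_cast (by omega : (2 : Int) < ((pvCanon edges).count c : Int))⟩
    · rintro ⟨x, hx⟩
      refine ⟨x, ?_, ?_⟩
      · exact List.count_pos_iff.mp (by rw [hcount]; omega)
      · rw [hcount]
        omega
  rw [hcondA]
  rcases hB : ((S.zip (S.drop 2)).any (fun p => p.1 == p.2)) with _ | _
  · simp
  · simp
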